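-- pv_equiv track=rewrite | github.com/ssl/2ME | 2ME.py | generate_domains
-- ===== SOURCE A (Python) =====
-- import itertools
--
-- def generate_domains(length, charset, max_generate):
--     """Generate domains of specified length using given character set."""
--     if charset == 'a-z':
--         chars = 'abcdefghijklmnopqrstuvwxyz'
--     elif charset == 'a-z0-9':
--         chars = 'abcdefghijklmnopqrstuvwxyz0123456789'
--     elif charset == '0-9':
--         chars = '0123456789'
--     else:
--         raise ValueError(f"Unknown charset: {charset}")
--
--     domains = []
--     count = 0
--     for domain in itertools.product(chars, repeat=length):
--         if count >= max_generate:
--             break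
--         domains.append(''.join(domain))
--         count += 1
--
--     return domains
-- ===== SOURCE B (Python) =====
-- def generate_domains(length, charset, max_generate):
--     """Generate domains of specified length using given character set."""
--     if charset == 'a-z':
--         chars = 'abcdefghijklmnopqrstuvwxyz'
--     elif charset == 'a-z0-9':
--         chars = 'abcdefghijklmnopqrstuvwxyz0123456789'
--     elif charset == '0-9':
--         chars = '0123456789'
--     else:
--         raise ValueError(f"Unknown charset: {charset}")
--
--     k = len(chars)
--     # cap the count at k**length without ever computing a huge power
--     n = max(0, max_generate)
--     total = 1
--     for _ in range(length):
--         if total >= n: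
--             break
--         total *= k
--     n = min(n, total)
--
--     domains = []
--     for i in range(n):
--         # decode i in base k, most-significant digit first
--         digits = []
--         x = i
--         for _ in range(length):
--             x, d = divmod(x, k)
--             digits.append(chars[d])
--         domains.append(''.join(reversed(digits)))
--     return domains
-- ===== Notes on version B (the rewrite author's own statement) =====
-- stated objective: alternative
-- what changed: replaces the itertools.product iteration with arithmetic indexing: the count is clamped to n = min(max_generate, k**length) (the power grown incrementally so it is never huge), and the i-th string is obtained by decoding i as a length-digit base-k number, most-significant digit first
import Mathlib
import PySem

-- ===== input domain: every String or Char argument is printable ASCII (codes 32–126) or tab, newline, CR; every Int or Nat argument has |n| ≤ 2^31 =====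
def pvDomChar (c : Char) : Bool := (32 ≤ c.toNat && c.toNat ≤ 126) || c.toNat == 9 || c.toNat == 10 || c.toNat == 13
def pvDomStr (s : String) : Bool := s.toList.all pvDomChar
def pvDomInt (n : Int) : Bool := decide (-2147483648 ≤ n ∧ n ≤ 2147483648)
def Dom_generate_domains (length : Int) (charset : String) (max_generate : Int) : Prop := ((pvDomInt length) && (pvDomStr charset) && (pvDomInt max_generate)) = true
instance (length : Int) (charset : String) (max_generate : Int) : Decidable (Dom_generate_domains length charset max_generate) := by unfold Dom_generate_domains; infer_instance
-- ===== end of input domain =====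

-- B replaces itertools.product iteration by arithmetic base-k index decoding (capped power);
-- proved equal to A on every valid charset and non-negative length (A raises elsewhere).


-- ===== PORT A =====
-- the charset dispatch common to both Pythons (A and B have the same if/elif chain);
-- none = the ValueError branch
def pvChars (charset : String) : Option String :=
  if charset = "a-z" then some "abcdefghijklmnopqrstuvwxyz"
  else if charset = "a-z0-9" then some "abcdefghijklmnopqrstuvwxyz0123456789"
  else if charset = "0-9" then some "0123456789"
  else none

-- one pass of the product stream at fixed leading character c: take up to m tuples
-- from each leading-character block in order (itertools.product is lazy; A's loop
-- consumes exactly its first max_generate tuples before breaking, so the lazy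
-- stream + break is ported as 'first m tuples of the product, in product order')
def takeProdGo (f : Nat → List (List Char)) : List Char → Nat → List (List Char)
  | [], _ => []
  | c :: rest, m =>
    if m = 0 then []
    else
      let blk := (f m).map (c :: ·)
      blk ++ takeProdGo f rest (m - blk.length)

-- first m tuples (in itertools.product order) of product(cs, repeat=L)
def takeProd (cs : List Char) : Nat → Nat → List (List Char)
  | 0, m => if m = 0 then [] else [[]]
  | L + 1, m => takeProdGo (takeProd cs L) cs m

def generate_domains (length : Int) (charset : String) (max_generate : Int) : List String :=
  match pvChars charset with
  | none => []  -- Python raises ValueError here (excluded by Pre_)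
  | some chars =>
    -- the for/break loop appends ''.join(domain) for the first max_generate tuples
    -- (count >= max_generate breaks at once when max_generate <= 0, hence .toNat)
    (takeProd chars.toList length.toNat max_generate.toNat).map String.mk

-- ===== PORT B =====
-- Source B's capping loop: total = 1; for _ in range(L): if total >= n: break; total *= k
def capB (k n : Nat) : Nat → Nat → Nat
  | 0, total => total
  | L + 1, total => if n ≤ total then total else capB k n L (total * k)

-- Source B's inner loop: for _ in range(L): x, d = divmod(x, k); digits.append(chars[d])
-- (chars[d] with 0 <= d < len(chars) never raises; ported as getD)
def decodeB (cs : List Char) (k : Nat) : Nat → Nat → List Char → List Char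
  | 0, _, digits => digits
  | L + 1, x, digits => decodeB cs k L (x / k) (digits ++ [cs.getD (x % k) 'a'])

def generate_domains_alt (length : Int) (charset : String) (max_generate : Int) : List String :=
  match pvChars charset with
  | none => []  -- Source B raises ValueError here (excluded by Pre_)
  | some chars =>
    let cs := chars.toList
    let k := cs.length
    let n0 := (max 0 max_generate).toNat
    let total := capB k n0 length.toNat 1
    let n := min n0 total
    (List.range n).map (fun i => String.mk (decodeB cs k length.toNat i []).reverse)

-- ===== PRECONDITION & SPEC =====
-- exactly where Python A returns: a recognised charset and a non-negative length
-- (otherwise A raises ValueError)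
def Pre_generate_domains (length : Int) (charset : String) (max_generate : Int) : Prop :=
  (charset = "a-z" ∨ charset = "a-z0-9" ∨ charset = "0-9") ∧ 0 ≤ length

instance (length : Int) (charset : String) (max_generate : Int) : Decidable (Pre_generate_domains length charset max_generate) := by unfold Pre_generate_domains; infer_instance

def pvWitness_generate_domains : Int × String × Int := (2, "0-9", 5)

def Spec_generate_domains (length : Int) (charset : String) (max_generate : Int) (out : List String) : Prop := out = generate_domains_alt length charset max_generate
instance (length : Int) (charset : String) (max_generate : Int) (out : List String) : Decidable (Spec_generate_domains length charset max_generate out) := by unfold Spec_generate_domains; infer_instance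

-- ===== CLAIM (what is proved, stated in full; the proofs are below) =====
def Claim_equal_generate_domains : Prop := ∀ (length : Int) (charset : String) (max_generate : Int), Dom_generate_domains length charset max_generate → Pre_generate_domains length charset max_generate → Spec_generate_domains length charset max_generate (generate_domains length charset max_generate)


-- ===== LEMMAS AND PROOFS =====

-- the full product list, in itertools.product order (proof-side only)
def prodAll (cs : List Char) : Nat → List (List Char)
  | 0 => [[]]
  | L + 1 => cs.flatMap (fun c => (prodAll cs L).map (c :: ·))

theorem pvFlatMapSing {α β : Type} (l : List α) (f : α → β) :
    l.flatMap (fun x => [f x]) = l.map f := by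
  induction l with
  | nil => rfl
  | cons a t ih => simp [ih]

-- the string Source B builds for index i (proof-side abbreviation)
def rd (cs : List Char) (L i : Nat) : List Char := (decodeB cs cs.length L i []).reverse

theorem decodeB_append (cs : List Char) (k : Nat) : ∀ (L x : Nat) (ds : List Char),
    decodeB cs k L x ds = ds ++ decodeB cs k L x [] := by
  intro L
  induction L with
  | zero => intro x ds; simp [decodeB]
  | succ L ih =>
    intro x ds
    simp only [decodeB]
    rw [ih (x / k) (ds ++ [cs.getD (x % k) 'a']), ih (x / k) ([] ++ [cs.getD (x % k) 'a'])]
    simp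

theorem rd_succ (cs : List Char) (L i : Nat) :
    rd cs (L + 1) i = rd cs L (i / cs.length) ++ [cs.getD (i % cs.length) 'a'] := by
  simp only [rd, decodeB]
  rw [decodeB_append cs cs.length L (i / cs.length) ([] ++ [cs.getD (i % cs.length) 'a'])]
  simp

theorem takeProd_eq_take (cs : List Char) : ∀ (L m : Nat),
    takeProd cs L m = (prodAll cs L).take m := by
  intro L
  induction L with
  | zero =>
    intro m
    cases m <;> simp [takeProd, prodAll]
  | succ L ih =>
    intro m
    show takeProdGo (takeProd cs L) cs m = _
    simp only [prodAll]
    -- inner induction over the character list being consumed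
    suffices h : ∀ (cur : List Char) (m : Nat),
        takeProdGo (takeProd cs L) cur m = (cur.flatMap (fun c => (prodAll cs L).map (c :: ·))).take m by
      exact h cs m
    intro cur
    induction cur with
    | nil => intro m; simp [takeProdGo]
    | cons c rest ihc =>
      intro m
      by_cases hm : m = 0
      · simp [takeProdGo, hm]
      · simp only [takeProdGo, if_neg hm, List.flatMap_cons, List.take_append, ihc]
        rw [ih m, ← List.map_take]
        congr 1
        congr 1
        simp only [List.length_map, List.length_take]
        omega

theorem map_eq_range_getD (cs : List Char) {α : Type} (g : Char → α) :
    cs.map g = (List.range cs.length).map (fun j => g (cs.getD j 'a')) := by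
  apply List.ext_getElem
  · simp
  · intro i h1 h2
    simp only [List.length_map] at h1 h2
    simp only [List.getElem_map, List.getElem_range]
    congr 1
    rw [List.getD_eq_getElem?_getD, List.getElem?_eq_getElem (by simpa using h1)]
    rfl

theorem range_mul_flatMap {α : Type} (b : Nat) (f : Nat → α) : ∀ (a : Nat),
    (List.range (a * b)).map f
      = (List.range a).flatMap (fun i => (List.range b).map (fun j => f (i * b + j))) := by
  intro a
  induction a with
  | zero => simp
  | succ a ih =>
    have : (a + 1) * b = a * b + b := by ring
    rw [this, List.range_add, List.range_succ, List.map_append, List.flatMap_append, ih]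
    simp [Function.comp, Nat.add_comm]

theorem prodAll_eq_range (cs : List Char) : ∀ (L : Nat),
    prodAll cs L = (List.range (cs.length ^ L)).map (rd cs L) := by
  intro L
  induction L with
  | zero => simp [prodAll, rd, decodeB]
  | succ L ih =>
    -- swap: peel the LAST character instead of the first
    have swap : ∀ (M : Nat), prodAll cs (M + 1)
        = (prodAll cs M).flatMap (fun t => cs.map (fun c => t ++ [c])) := by
      intro M
      induction M with
      | zero =>
        show cs.flatMap (fun c => [[c]]) = [[]].flatMap (fun t => cs.map (fun c => t ++ [c]))
        simp [pvFlatMapSing]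
      | succ M ihM =>
        show cs.flatMap (fun c => (prodAll cs (M + 1)).map (c :: ·))
          = (cs.flatMap (fun c => (prodAll cs M).map (c :: ·))).flatMap (fun t => cs.map (fun c => t ++ [c]))
        conv_lhs => rw [ihM]
        simp [List.map_flatMap, List.flatMap_assoc, List.flatMap_map, List.map_map, Function.comp_def]
    rw [swap L, ih, List.flatMap_map]
    rw [pow_succ]
    rw [range_mul_flatMap cs.length (f := fun m => rd cs (L + 1) m) (cs.length ^ L)]
    apply List.flatMap_congr
    intro i hi
    rw [map_eq_range_getD cs (fun c => rd cs L i ++ [c])]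
    apply List.map_congr_left
    intro j hj
    simp only [List.mem_range] at hj
    have hk : 0 < cs.length := by omega
    rw [rd_succ]
    have h1 : (i * cs.length + j) / cs.length = i := by
      rw [Nat.add_comm, Nat.add_mul_div_right j i hk, Nat.div_eq_of_lt hj, Nat.zero_add]
    have h2 : (i * cs.length + j) % cs.length = j := by
      rw [Nat.add_comm, Nat.add_mul_mod_self_right, Nat.mod_eq_of_lt hj]
    rw [h1, h2]

theorem capB_min (k n : Nat) (hk : 0 < k) : ∀ (L t : Nat),
    min n (capB k n L t) = min n (t * k ^ L) := by
  intro L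
  induction L with
  | zero => intro t; simp [capB]
  | succ L ih =>
    intro t
    simp only [capB]
    by_cases h : n ≤ t
    · rw [if_pos h]
      have h2 : n ≤ t * k ^ (L + 1) := le_trans h (Nat.le_mul_of_pos_right t (pow_pos hk _))
      rw [Nat.min_eq_left h, Nat.min_eq_left h2]
    · rw [if_neg h, ih (t * k)]
      congr 1
      ring

-- the common generic fact: first-m-of-product equals range-map-decode at the capped count
theorem main_lemma (cs : List Char) (hk : 0 < cs.length) (L : Nat) (m : Int) :
    (takeProd cs L m.toNat).map String.mk
      = (List.range (min ((max 0 m).toNat) (capB cs.length ((max 0 m).toNat) L 1))).map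
          (fun i => String.mk (decodeB cs cs.length L i []).reverse) := by
  rw [takeProd_eq_take, prodAll_eq_range, ← List.map_take, List.take_range]
  rw [capB_min cs.length ((max 0 m).toNat) hk L 1]
  have : (max 0 m).toNat = m.toNat := by omega
  rw [this, one_mul, List.map_map]
  rfl

-- ===== VERDICT (by name: the statement is the Claim_ definition above) =====
theorem generate_domains_spec : Claim_equal_generate_domains := by
  intro length charset max_generate _ hpre
  obtain ⟨hcs, _⟩ := hpre
  unfold Spec_generate_domains generate_domains generate_domains_alt
  rcases hcs with h | h | h <;> subst h
  · rw [show pvChars "a-z" = some "abcdefghijklmnopqrstuvwxyz" from by decide]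
    exact main_lemma _ (by decide) _ _
  · rw [show pvChars "a-z0-9" = some "abcdefghijklmnopqrstuvwxyz0123456789" from by decide]
    exact main_lemma _ (by decide) _ _
  · rw [show pvChars "0-9" = some "0123456789" from by decide]
    exact main_lemma _ (by decide) _ _
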